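-- pv_equiv track=rewrite | github.com/RaedSalhab/Exercises | CodeWars/my_friend_cheating.py | remov_nb1
-- ===== SOURCE A (Python) =====
-- def remov_nb1(n):
--     lst = []
--     for i in range(n+1):
--         for j in range(n+1):
--             if i != j:
--                 if (i * j) == (sum(range(n+1))- i - j):
--                     lst.append((i, j))
--     return lst
-- ===== SOURCE B (Python) =====
-- def remov_nb1(n):
--     total = n * (n + 1) // 2
--     res = []
--     for i in range(n + 1):
--         num = total - i
--         if num % (i + 1) == 0:
--             j = num // (i + 1)
--             if 0 <= j <= n and i != j:
--                 res.append((i, j))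
--     return res
-- ===== Notes on version B (the rewrite author's own statement) =====
-- stated objective: faster
-- what changed: Instead of scanning all pairs and recomputing the sum of the range inside the inner test, B computes the triangular total once in closed form and, for each i, solves the equation for the unique j, checking divisibility and range.
import Mathlib
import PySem

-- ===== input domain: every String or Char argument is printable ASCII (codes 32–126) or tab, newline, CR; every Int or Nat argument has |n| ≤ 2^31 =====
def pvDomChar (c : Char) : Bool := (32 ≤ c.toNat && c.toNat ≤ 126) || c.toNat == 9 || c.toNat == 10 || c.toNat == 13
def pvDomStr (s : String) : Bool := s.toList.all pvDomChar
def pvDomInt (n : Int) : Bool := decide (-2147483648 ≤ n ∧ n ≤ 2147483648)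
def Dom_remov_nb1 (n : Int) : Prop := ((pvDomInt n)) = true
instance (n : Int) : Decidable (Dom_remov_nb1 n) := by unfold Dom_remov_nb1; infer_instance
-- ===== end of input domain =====

-- B replaces A's O(n^3) double scan (with sum(range) recomputed in the inner test) by a single
-- pass that solves (i+1)*j = total - i for j directly; objective: faster (asymptotic).

-- ===== PORT A =====
-- sum(range(n+1)), recomputed by A inside the inner condition
def pySumRange (n : Int) : Int := (PySem.List.pyRange 0 (n + 1) 1).foldl (fun a b => a + b) 0

def remov_nb1 (n : Int) : List (Int × Int) :=
  (PySem.List.pyRange 0 (n + 1) 1).foldl (fun lst i =>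
    (PySem.List.pyRange 0 (n + 1) 1).foldl (fun lst j =>
      if i ≠ j then
        if i * j = pySumRange n - i - j then lst ++ [(i, j)] else lst
      else lst) lst) []

-- ===== PORT B =====
def remov_nb1_alt (n : Int) : List (Int × Int) :=
  let total := PySem.Int.floordiv (n * (n + 1)) 2
  (PySem.List.pyRange 0 (n + 1) 1).foldl (fun res i =>
    let num := total - i
    if PySem.Int.mod num (i + 1) = 0 then
      let j := PySem.Int.floordiv num (i + 1)
      if (0 ≤ j ∧ j ≤ n) ∧ i ≠ j then res ++ [(i, j)] else res
    else res) []

-- ===== PRECONDITION & SPEC =====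
def Spec_remov_nb1 (n : Int) (out : List (Int × Int)) : Prop := out = remov_nb1_alt n
instance (n : Int) (out : List (Int × Int)) : Decidable (Spec_remov_nb1 n out) := by unfold Spec_remov_nb1; infer_instance

-- ===== CLAIM (what is proved, stated in full; the proofs are below) =====
def Claim_equal_remov_nb1 : Prop := ∀ (n : Int), Dom_remov_nb1 n → Spec_remov_nb1 n (remov_nb1 n)

-- ===== LEMMAS AND PROOFS =====

theorem pv_filter_eq_singleton {l : List Int} (hn : l.Nodup) {a : Int} (h : a ∈ l) :
    l.filter (fun x => decide (x = a)) = [a] := by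
  induction l with
  | nil => cases h
  | cons x xs ih =>
    rcases List.mem_cons.mp h with rfl | hmem
    · have hnin : a ∉ xs := (List.nodup_cons.mp hn).1
      simp only [List.filter_cons, decide_eq_true_eq, if_true, List.cons.injEq, true_and]
      refine List.filter_eq_nil_iff.mpr ?_
      intro y hy
      simp only [decide_eq_true_eq]
      rintro rfl; exact hnin hy
    · have hx : x ≠ a := by rintro rfl; exact (List.nodup_cons.mp hn).1 hmem
      simp only [List.filter_cons, decide_eq_true_eq, if_neg hx]
      exact ih (List.nodup_cons.mp hn).2 hmem

theorem pv_two_mul_pySum (n : Int) (hn : 0 ≤ n) : 2 * pySumRange n = n * (n + 1) := by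
  induction n, hn using Int.le_induction with
  | base => decide
  | succ m hm ih =>
    unfold pySumRange at *
    rw [PySem.List.pyRange_one_succ_right (by omega : (0:Int) ≤ m + 1), List.foldl_append]
    simp only [List.foldl_cons, List.foldl_nil]
    linear_combination ih

theorem pv_total_eq (n : Int) (hn : 0 ≤ n) :
    PySem.Int.floordiv (n * (n + 1)) 2 = pySumRange n := by
  rw [PySem.Int.floordiv_eq_ediv_of_pos (by norm_num : (0:Int) < 2),
    ← pv_two_mul_pySum n hn]
  exact Int.mul_ediv_cancel_left _ (by norm_num)

-- the inner j-loop of A produces exactly the single candidate B checks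
theorem pv_inner (n i : Int) (hi : 0 ≤ i) (acc : List (Int × Int)) :
    (PySem.List.pyRange 0 (n + 1) 1).foldl (fun lst j =>
        if i ≠ j then
          if i * j = pySumRange n - i - j then lst ++ [(i, j)] else lst
        else lst) acc
    = (if PySem.Int.mod (pySumRange n - i) (i + 1) = 0 then
        if (0 ≤ PySem.Int.floordiv (pySumRange n - i) (i + 1) ∧
            PySem.Int.floordiv (pySumRange n - i) (i + 1) ≤ n) ∧
            i ≠ PySem.Int.floordiv (pySumRange n - i) (i + 1)
        then acc ++ [(i, PySem.Int.floordiv (pySumRange n - i) (i + 1))] else acc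
      else acc) := by
  set S := pySumRange n with hS
  have hstep : (fun (lst : List (Int × Int)) j =>
      if i ≠ j then
        if i * j = S - i - j then lst ++ [(i, j)] else lst
      else lst)
      = (fun lst j => if i ≠ j ∧ i * j = S - i - j then lst ++ [(i, j)] else lst) := by
    funext lst j
    by_cases h1 : i = j <;> by_cases h2 : i * j = S - i - j <;> simp [h1, h2]
  rw [hstep, PySem.List.foldl_append_ite]
  have hpos : (0 : Int) < i + 1 := by omega
  have hcond : ∀ j : Int, i * j = S - i - j ↔ (i + 1) * j = S - i := by
    intro j
    constructor <;> intro h <;> nlinarith [h]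
  by_cases hd : PySem.Int.mod (S - i) (i + 1) = 0
  · have hdvd : (i + 1) ∣ (S - i) := (PySem.Int.mod_eq_zero_iff_dvd _ _).mp hd
    obtain ⟨k, hk⟩ := hdvd
    have hj0 : PySem.Int.floordiv (S - i) (i + 1) = k := by
      rw [PySem.Int.floordiv_eq_ediv_of_pos hpos, hk]
      exact Int.mul_ediv_cancel_left _ (by omega)
    have hiff : ∀ j : Int, (i ≠ j ∧ i * j = S - i - j) ↔ (i ≠ k ∧ j = k) := by
      intro j
      rw [hcond j, hk]
      constructor
      · rintro ⟨hne, heq⟩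
        have : j = k := by
          have := mul_left_cancel₀ (by omega : i + 1 ≠ 0) heq
          exact this
        exact ⟨this ▸ hne, this⟩
      · rintro ⟨hne, rfl⟩; exact ⟨hne, rfl⟩
    rw [if_pos hd, hj0]
    by_cases hc : (0 ≤ k ∧ k ≤ n) ∧ i ≠ k
    · rw [if_pos hc]
      have hfilter : (PySem.List.pyRange 0 (n + 1) 1).filter
          (fun j => decide (i ≠ j ∧ i * j = S - i - j)) = [k] := by
        have h1 : (PySem.List.pyRange 0 (n + 1) 1).filter
            (fun j => decide (i ≠ j ∧ i * j = S - i - j))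
            = (PySem.List.pyRange 0 (n + 1) 1).filter (fun j => decide (j = k)) := by
          apply List.filter_congr
          intro j _
          simp only [decide_eq_decide]
          rw [hiff j]
          constructor
          · rintro ⟨_, rfl⟩; rfl
          · rintro rfl; exact ⟨hc.2, rfl⟩
        rw [h1]
        exact pv_filter_eq_singleton (PySem.List.nodup_pyRange_one 0 (n+1))
          ((PySem.List.mem_pyRange_one).mpr ⟨hc.1.1, by omega⟩)
      rw [hfilter]; simp
    · rw [if_neg hc]
      have hfilter : (PySem.List.pyRange 0 (n + 1) 1).filter
          (fun j => decide (i ≠ j ∧ i * j = S - i - j)) = [] := by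
        refine List.filter_eq_nil_iff.mpr ?_
        intro j hj
        simp only [decide_eq_true_eq]
        intro hpj
        obtain ⟨hne, rfl⟩ := (hiff j).mp hpj
        have hjr := (PySem.List.mem_pyRange_one).mp hj
        exact hc ⟨⟨hjr.1, by omega⟩, hne⟩
      rw [hfilter]; simp
  · rw [if_neg hd]
    have hfilter : (PySem.List.pyRange 0 (n + 1) 1).filter
        (fun j => decide (i ≠ j ∧ i * j = S - i - j)) = [] := by
      refine List.filter_eq_nil_iff.mpr ?_
      intro j _
      simp only [decide_eq_true_eq]
      rintro ⟨_, heq⟩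
      exact hd ((PySem.Int.mod_eq_zero_iff_dvd _ _).mpr ⟨j, ((hcond j).mp heq).symm⟩)
    rw [hfilter]; simp

theorem pv_main (n : Int) : remov_nb1 n = remov_nb1_alt n := by
  by_cases h : n + 1 ≤ 0
  · simp only [remov_nb1, remov_nb1_alt, PySem.List.pyRange_one_eq_nil h, List.foldl_nil]
  · have hn : 0 ≤ n := by omega
    simp only [remov_nb1, remov_nb1_alt, pv_total_eq n hn]
    apply PySem.List.foldl_congr_mem
    intro acc i hi
    have hi0 : 0 ≤ i := ((PySem.List.mem_pyRange_one).mp hi).1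
    exact pv_inner n i hi0 acc

-- ===== VERDICT (by name: the statement is the Claim_ definition above) =====
theorem remov_nb1_spec : Claim_equal_remov_nb1 := by
  intro n _
  unfold Spec_remov_nb1
  exact pv_main n
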